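-- pv_equiv track=rewrite | github.com/macnch33s3/OPRE | LB2_KO_PROJECT/parallel_machine_scheduling_problem/pms_solution.py | greedy_spt
-- ===== SOURCE A (Python) =====
-- from typing import List, Tuple, Dict    # Type hints
--
-- def greedy_spt(num_machines: int, job_durations: List[int]) -> List[List[int]]: # greedy shortest processing time / gleich wie greedy_lpt nur ohne reverse
--                                                                                 # Sortiert Jobs aufsteigend nach Dauer.
--                                                                                 # returns job-zuweisung als list[list[int]]
--
--     # Jobs nach Dauer sortieren (aufsteigend) / gleich wei bei greedy_lpt
--     jobs_sorted = sorted(range(len(job_durations)),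
--                         key=lambda j: job_durations[j]) # hier ohne reverse
--
--     # Initialisierung
--     assignment = [[] for _ in range(num_machines)]
--     machine_loads = [0] * num_machines
--
--     # Jobs zuweisen
--     for job in jobs_sorted:
--         min_machine = min(range(num_machines), key=lambda m: machine_loads[m])
--         assignment[min_machine].append(job)
--         machine_loads[min_machine] += job_durations[job]
--
--     return assignment
-- ===== SOURCE B (Python) =====
-- from typing import List    # Type hints
--
-- def greedy_spt(num_machines: int, job_durations: List[int]) -> List[List[int]]:
--     # Keep the machines in a priority queue: a list of (load, machine) pairs kept
--     # sorted ascending, so the least-loaded machine (smallest index on ties) is pq[0];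
--     # reinsertion position is found by binary search instead of re-scanning all loads.
--     order = sorted(range(len(job_durations)), key=lambda j: job_durations[j])
--     assignment = [[] for _ in range(num_machines)]
--     pq = [(0, m) for m in range(num_machines)]
--     for job in order:
--         load, m = pq.pop(0)
--         assignment[m].append(job)
--         item = (load + job_durations[job], m)
--         lo, hi = 0, len(pq)
--         while lo < hi:
--             mid = (lo + hi) // 2
--             if pq[mid] <= item:
--                 lo = mid + 1
--             else:
--                 hi = mid
--         pq.insert(lo, item)
--     return assignment
-- ===== Notes on version B (the rewrite author's own statement) =====
-- stated objective: faster
-- what changed: Replaces the per-job linear min-scan over all machine loads with a priority queue kept as an ascending sorted list of (load, machine) pairs: the least-loaded machine is popped from the front and reinserted at a position found by binary search.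
import Mathlib
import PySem

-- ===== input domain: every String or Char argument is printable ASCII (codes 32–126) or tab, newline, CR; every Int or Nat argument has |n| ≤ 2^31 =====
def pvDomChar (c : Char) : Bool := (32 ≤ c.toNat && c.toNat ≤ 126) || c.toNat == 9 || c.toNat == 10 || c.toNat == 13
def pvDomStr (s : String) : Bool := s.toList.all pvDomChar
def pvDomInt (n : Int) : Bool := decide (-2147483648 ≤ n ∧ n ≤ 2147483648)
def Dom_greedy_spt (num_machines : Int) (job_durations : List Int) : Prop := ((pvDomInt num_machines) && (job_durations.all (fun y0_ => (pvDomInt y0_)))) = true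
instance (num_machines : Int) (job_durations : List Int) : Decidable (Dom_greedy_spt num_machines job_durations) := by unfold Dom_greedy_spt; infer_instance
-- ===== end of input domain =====

-- B replaces A's per-job linear min-scan over machine loads by a sorted-list priority
-- queue with binary-search reinsertion (measurably faster; return value only, no mutation).

-- ===== PORT A =====
-- min(range(num_machines), key=lambda m: machine_loads[m])  (.getD 0 is unreached: Pre_ excludes the empty range)
def gsMin (num_machines : Int) (loads : List Int) : Int :=
  (PySem.List.min? (PySem.List.pyRange 0 num_machines 1)
    (fun m => PySem.List.pyGetD loads m 0)).getD 0

-- one iteration of A's `for job in jobs_sorted` loop, state = (assignment, machine_loads)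
def gsStepA (num_machines : Int) (job_durations : List Int)
    (st : List (List Int) × List Int) (job : Int) : List (List Int) × List Int :=
  let mm := gsMin num_machines st.2
  (PySem.List.pySetD st.1 mm (PySem.List.pyGetD st.1 mm [] ++ [job]),
   PySem.List.pySetD st.2 mm
     (PySem.List.pyGetD st.2 mm 0 + PySem.List.pyGetD job_durations job 0))

def greedy_spt (num_machines : Int) (job_durations : List Int) : List (List Int) :=
  let jobs_sorted := PySem.List.sorted (PySem.List.pyRange 0 (job_durations.length : Int) 1)
    (fun j => PySem.List.pyGetD job_durations j 0) false
  let assignment := (PySem.List.pyRange 0 num_machines 1).map (fun _ => ([] : List Int))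
  let machine_loads := PySem.List.pyRepeat [(0 : Int)] num_machines
  (jobs_sorted.foldl (gsStepA num_machines job_durations) (assignment, machine_loads)).1

-- ===== PORT B =====
-- Python tuple comparison `a <= b` on (load, machine) pairs (lexicographic)
def gsLe (a b : Int × Int) : Bool :=
  decide (a.1 < b.1) || (decide (a.1 = b.1) && decide (a.2 ≤ b.2))

-- B's hand-written binary search: the `while lo < hi` loop (bisect-right position for item)
def gsBisect (pq : List (Int × Int)) (item : Int × Int) (lo hi : Int) : Int :=
  if h : lo < hi then
    let mid := PySem.Int.floordiv (lo + hi) 2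
    if gsLe (PySem.List.pyGetD pq mid (0, 0)) item then gsBisect pq item (mid + 1) hi
    else gsBisect pq item lo mid
  else lo
termination_by (hi - lo).toNat
decreasing_by
  · have hb := (PySem.Int.le_floordiv_iff_mul_le (b := 2) (by omega)).mpr
      (show lo * 2 ≤ lo + hi by omega)
    omega
  · have hlt : PySem.Int.floordiv (lo + hi) 2 < hi :=
      (PySem.Int.floordiv_lt_iff_lt_mul (by omega)).mpr (by omega)
    omega

-- one iteration of B's loop, state = (assignment, pq); pq.pop(0) on an empty pq is a
-- Python IndexError (excluded by Pre_), the [] branch is unreached there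
def gsStepB (job_durations : List Int)
    (st : List (List Int) × List (Int × Int)) (job : Int) :
    List (List Int) × List (Int × Int) :=
  match st.2 with
  | [] => (st.1, [])
  | (load, m) :: pqrest =>
    let item := (load + PySem.List.pyGetD job_durations job 0, m)
    let lo := gsBisect pqrest item 0 (pqrest.length : Int)
    (PySem.List.pySetD st.1 m (PySem.List.pyGetD st.1 m [] ++ [job]),
     PySem.List.insert pqrest lo item)

def greedy_spt_alt (num_machines : Int) (job_durations : List Int) : List (List Int) :=
  let order := PySem.List.sorted (PySem.List.pyRange 0 (job_durations.length : Int) 1)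
    (fun j => PySem.List.pyGetD job_durations j 0) false
  let assignment := (PySem.List.pyRange 0 num_machines 1).map (fun _ => ([] : List Int))
  let pq := (PySem.List.pyRange 0 num_machines 1).map (fun m => ((0 : Int), m))
  (order.foldl (gsStepB job_durations) (assignment, pq)).1

-- ===== PRECONDITION & SPEC =====
-- Pre_ excludes exactly the inputs where A raises (min() of an empty range is a
-- ValueError: num_machines ≤ 0 with a nonempty job list); B raises there too (pop from empty list).
def Pre_greedy_spt (num_machines : Int) (job_durations : List Int) : Prop :=
  1 ≤ num_machines ∨ job_durations = []
instance (num_machines : Int) (job_durations : List Int) : Decidable (Pre_greedy_spt num_machines job_durations) := by unfold Pre_greedy_spt; infer_instance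

def pvWitness_greedy_spt : Int × List Int := (2, [3, 1, 2])

def Spec_greedy_spt (num_machines : Int) (job_durations : List Int) (out : List (List Int)) : Prop := out = greedy_spt_alt num_machines job_durations
instance (num_machines : Int) (job_durations : List Int) (out : List (List Int)) : Decidable (Spec_greedy_spt num_machines job_durations out) := by unfold Spec_greedy_spt; infer_instance

-- ===== CLAIM (what is proved, stated in full; the proofs are below) =====
def Claim_equal_greedy_spt : Prop := ∀ (num_machines : Int) (job_durations : List Int), Dom_greedy_spt num_machines job_durations → Pre_greedy_spt num_machines job_durations → Spec_greedy_spt num_machines job_durations (greedy_spt num_machines job_durations)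

-- ===== LEMMAS AND PROOFS =====

-- strict lexicographic order on (load, machine) pairs
def pltP (a b : Int × Int) : Prop := a.1 < b.1 ∨ (a.1 = b.1 ∧ a.2 < b.2)

-- the multiset of (load, machine) pairs a load list denotes
def enumP (l : List Int) : List (Int × Int) := l.zipIdx.map (fun p => (p.1, (p.2 : Int)))

lemma gsLe_false_iff (a b : Int × Int) : gsLe a b = false ↔ pltP b a := by
  simp [gsLe, pltP]; omega

lemma pltP_trans {a b c : Int × Int} (h1 : pltP a b) (h2 : pltP b c) : pltP a c := by
  simp [pltP] at *; omega

lemma pltP_of_gsLe_of_ne {a b : Int × Int} (h : gsLe a b = true) (hne : a.2 ≠ b.2) : pltP a b := by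
  simp [gsLe, pltP] at *; omega

lemma gsLe_trans_plt {a b c : Int × Int} (h1 : pltP a b) (h2 : gsLe b c = true) : gsLe a c = true := by
  simp [gsLe, pltP] at *; omega

lemma length_enumP (l : List Int) : (enumP l).length = l.length := by
  simp [enumP]

lemma getElem_enumP (l : List Int) (i : Nat) (h : i < l.length) :
    (enumP l)[i]'(by simpa [length_enumP] using h) = (l[i], (i : Int)) := by
  simp [enumP, List.getElem_zipIdx]

lemma mem_enumP {l : List Int} {p : Int × Int} (h : p ∈ enumP l) :
    ∃ i : Nat, ∃ hi : i < l.length, p = (l[i], (i : Int)) := by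
  obtain ⟨j, hj, hget⟩ := List.getElem_of_mem h
  refine ⟨j, by simpa [length_enumP] using hj, ?_⟩
  rw [← hget, getElem_enumP]

lemma enumP_set (l : List Int) (i : Nat) (x : Int) (h : i < l.length) :
    enumP (l.set i x) = (enumP l).set i (x, (i : Int)) := by
  apply List.ext_getElem
  · simp [length_enumP]
  · intro j h1 h2
    have hj : j < l.length := by simpa [length_enumP] using h1
    rw [List.getElem_set]
    by_cases hij : j = i
    · subst hij
      rw [getElem_enumP _ j (by simpa using hj)]
      simp
    · rw [getElem_enumP _ j (by simpa using hj), getElem_enumP _ j hj]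
      simp [Ne.symm hij]

-- ---- characterisation of A's min(range(M), key=...) : it returns the lexicographically
-- least (key, index) pair, i.e. the first index attaining the minimal key ----

-- the accumulator step inside PySem.List.min?
def gsPick (key : Int → Int) (acc : Option Int) (x : Int) : Option Int :=
  match acc with
  | none => some x
  | some m => if key x < key m then some x else some m

lemma min?_eq_foldl_gsPick (xs : List Int) (key : Int → Int) :
    PySem.List.min? xs key = xs.foldl (gsPick key) none := by
  unfold PySem.List.min?
  congr 1
  funext acc x
  cases acc <;> rfl

lemma foldl_gsPick_stay (key : Int → Int) (l : List Int) (m : Int)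
    (h : ∀ y ∈ l, ¬ key y < key m) : l.foldl (gsPick key) (some m) = some m := by
  induction l with
  | nil => rfl
  | cons y l ih =>
    have hy := h y (by simp)
    simp only [List.foldl_cons, gsPick, if_neg hy]
    exact ih (fun z hz => h z (by simp [hz]))

lemma foldl_gsPick_win (key : Int → Int) (h : Int) :
    ∀ (l : List Int) (m : Int), key h < key m → h ∈ l → l.Pairwise (· < ·) →
    (∀ y ∈ l, key h < key y ∨ (key h = key y ∧ h ≤ y)) →
    l.foldl (gsPick key) (some m) = some h := by
  intro l
  induction l with
  | nil => intro m _ hmem; cases hmem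
  | cons y l ih =>
    intro m hlt hmem hsort hle
    by_cases hyh : y = h
    · subst hyh
      simp only [List.foldl_cons, gsPick, if_pos hlt]
      apply foldl_gsPick_stay
      intro z hz
      rcases hle z (by simp [hz]) with h1 | ⟨h1, _⟩ <;> omega
    · have hml : h ∈ l := by
        rcases List.mem_cons.mp hmem with h' | h'
        · exact absurd h'.symm hyh
        · exact h'
      have hylt : y < h := (List.pairwise_cons.mp hsort).1 h hml
      have hky : key h < key y := by
        rcases hle y (by simp) with h1 | ⟨_, h2⟩
        · exact h1
        · omega
      simp only [List.foldl_cons, gsPick]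
      split_ifs with hc
      · exact ih y hky hml (List.pairwise_cons.mp hsort).2 (fun z hz => hle z (by simp [hz]))
      · exact ih m hlt hml (List.pairwise_cons.mp hsort).2 (fun z hz => hle z (by simp [hz]))

lemma min?_eq_first (xs : List Int) (key : Int → Int) (h : Int)
    (hmem : h ∈ xs) (hsort : xs.Pairwise (· < ·))
    (hle : ∀ y ∈ xs, key h < key y ∨ (key h = key y ∧ h ≤ y)) :
    PySem.List.min? xs key = some h := by
  cases xs with
  | nil => cases hmem
  | cons x l =>
    rw [min?_eq_foldl_gsPick]
    simp only [List.foldl_cons, gsPick]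
    by_cases hxh : x = h
    · subst hxh
      apply foldl_gsPick_stay
      intro z hz
      rcases hle z (by simp [hz]) with h1 | ⟨h1, _⟩ <;> omega
    · have hml : h ∈ l := by
        rcases List.mem_cons.mp hmem with h' | h'
        · exact absurd h'.symm hxh
        · exact h'
      have hxlt : x < h := (List.pairwise_cons.mp hsort).1 h hml
      have hkx : key h < key x := by
        rcases hle x (by simp) with h1 | ⟨_, h2⟩
        · exact h1
        · omega
      exact foldl_gsPick_win key h l x hkx hml (List.pairwise_cons.mp hsort).2
        (fun z hz => hle z (by simp [hz]))

-- ---- binary-search specification ----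

lemma gsBisect_spec (pq : List (Int × Int)) (item : Int × Int)
    (hs : pq.Pairwise pltP) :
    ∀ (n : Nat) (lo hi : Int), (hi - lo).toNat ≤ n → 0 ≤ lo → lo ≤ hi → hi ≤ (pq.length : Int) →
    (∀ i : Nat, (h : i < pq.length) → (i : Int) < lo → gsLe pq[i] item = true) →
    (∀ i : Nat, (h : i < pq.length) → hi ≤ (i : Int) → gsLe pq[i] item = false) →
    0 ≤ gsBisect pq item lo hi ∧ gsBisect pq item lo hi ≤ (pq.length : Int) ∧
    (∀ i : Nat, (h : i < pq.length) → (i : Int) < gsBisect pq item lo hi → gsLe pq[i] item = true) ∧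
    (∀ i : Nat, (h : i < pq.length) → gsBisect pq item lo hi ≤ (i : Int) → gsLe pq[i] item = false) := by
  intro n
  induction n with
  | zero =>
    intro lo hi hn h0 hlh hhi hlow hup
    have heq : lo = hi := by omega
    rw [gsBisect]
    simp only [dif_neg (show ¬ lo < hi by omega)]
    exact ⟨h0, by omega, hlow, fun i hi2 hge => hup i hi2 (by omega)⟩
  | succ n ih =>
    intro lo hi hn h0 hlh hhi hlow hup
    by_cases hc : lo < hi
    · rw [gsBisect]
      simp only [dif_pos hc]
      have hmidb := PySem.Int.floordiv_two_mid_bounds (le_of_lt hc)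
      set mid := PySem.Int.floordiv (lo + hi) 2 with hmiddef
      have hmidlt : mid < hi := (PySem.Int.floordiv_lt_iff_lt_mul (by omega)).mpr (by omega)
      have hmidn : mid.toNat < pq.length := by omega
      have hget : PySem.List.pyGetD pq mid (0, 0) = pq[mid.toNat] :=
        PySem.List.pyGetD_eq_getElem pq (0, 0) (by omega) (by omega)
      have hpw := List.pairwise_iff_getElem.mp hs
      split_ifs with hcase
      · rw [hget] at hcase
        apply ih (mid + 1) hi (by omega) (by omega) (by omega) hhi
        · intro i hi2 hilt
          by_cases hie : i = mid.toNat
          · subst hie; exact hcase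
          · exact gsLe_trans_plt (hpw i mid.toNat hi2 hmidn (by omega)) hcase
        · exact hup
      · rw [hget] at hcase
        have hcf : gsLe pq[mid.toNat] item = false := by
          simpa using hcase
        apply ih lo mid (by omega) h0 (by omega) (by omega) hlow
        intro i hi2 hige
        by_cases hie : i = mid.toNat
        · subst hie; exact hcf
        · have hplt : pltP item pq[i] :=
            pltP_trans ((gsLe_false_iff _ _).mp hcf) (hpw mid.toNat i hmidn hi2 (by omega))
          exact (gsLe_false_iff _ _).mpr hplt
    · rw [gsBisect]
      simp only [dif_neg hc]
      exact ⟨h0, by omega, hlow, fun i hi2 hge => hup i hi2 (by omega)⟩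

-- ---- the step invariant ----

-- the priority queue invariant linking B's pq to A's load list
def gsInv (loads : List Int) (pq : List (Int × Int)) : Prop :=
  pq.Pairwise pltP ∧ pq.Perm (enumP loads)

lemma map_snd_enumP (l : List Int) :
    (enumP l).map Prod.snd = (List.range l.length).map Int.ofNat := by
  apply List.ext_getElem
  · simp [length_enumP]
  · intro j h1 h2
    have hj : j < l.length := by simpa [length_enumP] using h1
    simp only [List.getElem_map, List.getElem_range]
    rw [getElem_enumP l j hj]
    rfl

lemma inv_nodup_snd {loads : List Int} {pq : List (Int × Int)} (h : gsInv loads pq) :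
    (pq.map Prod.snd).Nodup := by
  have hperm : (pq.map Prod.snd).Perm ((enumP loads).map Prod.snd) := h.2.map Prod.snd
  rw [hperm.nodup_iff, map_snd_enumP]
  exact List.Nodup.map (fun a b hab => by simpa [Int.ofNat_inj] using hab) List.nodup_range

-- head of the invariant queue: its machine index is in range and carries its load
lemma inv_head {loads : List Int} {v k : Int} {rest : List (Int × Int)}
    (h : gsInv loads ((v, k) :: rest)) :
    ∃ i : Nat, ∃ hi : i < loads.length, k = (i : Int) ∧ v = loads[i] := by
  have hmem : (v, k) ∈ enumP loads := h.2.subset (by simp)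
  obtain ⟨i, hi, hp⟩ := mem_enumP hmem
  exact ⟨i, hi, by simp at hp; omega, by simp at hp; exact hp.1⟩

-- A picks exactly the machine at the head of B's queue
lemma gsMin_eq_head {M : Int} {loads : List Int} {v k : Int} {rest : List (Int × Int)}
    (hlen : loads.length = M.toNat) (hM : 1 ≤ M)
    (h : gsInv loads ((v, k) :: rest)) :
    gsMin M loads = k := by
  obtain ⟨i, hik, hk, hv⟩ := inv_head h
  -- every pair of enumP loads is the head itself or lex-greater than it
  have hall : ∀ p ∈ enumP loads, p = (v, k) ∨ pltP (v, k) p := by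
    intro p hp
    have hp2 : p ∈ (v, k) :: rest := h.2.symm.subset hp
    rcases List.mem_cons.mp hp2 with h' | h'
    · exact Or.inl h'
    · exact Or.inr (List.rel_of_pairwise_cons h.1 h')
  have hle : ∀ y ∈ PySem.List.pyRange 0 M 1,
      PySem.List.pyGetD loads k 0 < PySem.List.pyGetD loads y 0 ∨
      (PySem.List.pyGetD loads k 0 = PySem.List.pyGetD loads y 0 ∧ k ≤ y) := by
    intro y hy
    have hyb := PySem.List.mem_pyRange_one.mp hy
    have hyl : y.toNat < loads.length := by omega
    have hgy : PySem.List.pyGetD loads y 0 = loads[y.toNat] :=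
      PySem.List.pyGetD_eq_getElem loads 0 (by omega) (by omega)
    have hgk : PySem.List.pyGetD loads k 0 = loads[i] := by
      rw [hk, PySem.List.pyGetD_natCast]; exact List.getD_eq_getElem loads 0 hik
    have hmy : (loads[y.toNat], (y.toNat : Int)) ∈ enumP loads := by
      have := getElem_enumP loads y.toNat hyl
      exact this ▸ List.getElem_mem _
    rcases hall _ hmy with h' | h'
    · right
      have h1 : loads[y.toNat] = v := congrArg Prod.fst h'
      have h2 : (y.toNat : Int) = k := congrArg Prod.snd h'
      constructor
      · rw [hgy, hgk, ← hv, h1]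
      · omega
    · rcases h' with h' | ⟨h1, h2⟩
      · left; rw [hgy, hgk, ← hv]; simpa using h'
      · right
        simp only at h1 h2
        constructor
        · rw [hgy, hgk, ← hv, h1]
        · omega
  have hkmem : k ∈ PySem.List.pyRange 0 M 1 := by
    rw [PySem.List.mem_pyRange_one]; omega
  have := min?_eq_first (PySem.List.pyRange 0 M 1) (fun y => PySem.List.pyGetD loads y 0) k
    hkmem (PySem.List.pairwise_lt_pyRange_one 0 M) hle
  rw [gsMin, this]
  rfl

-- the updated states are related again
lemma inv_step {loads : List Int} {v k d : Int} {rest : List (Int × Int)}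
    (h : gsInv loads ((v, k) :: rest)) :
    gsInv (PySem.List.pySetD loads k (PySem.List.pyGetD loads k 0 + d))
        (PySem.List.insert rest (gsBisect rest (v + d, k) 0 (rest.length : Int)) (v + d, k)) := by
  obtain ⟨i, hik, hk, hv⟩ := inv_head h
  have hpwr : rest.Pairwise pltP := (List.pairwise_cons.mp h.1).2
  have hknr : k ∉ rest.map Prod.snd := by
    have hnd := inv_nodup_snd h
    simp only [List.map_cons, List.nodup_cons] at hnd
    exact hnd.1
  obtain ⟨hr0, hrlen, hbelow, habove⟩ :=
    gsBisect_spec rest (v + d, k) hpwr rest.length 0 (rest.length : Int)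
      (by omega) (by omega) (by omega) (by omega)
      (fun j hj hlt => absurd hlt (by omega))
      (fun j hj hge => absurd hge (by omega))
  set r := gsBisect rest (v + d, k) 0 (rest.length : Int) with hrdef
  have hrL : r = ((r.toNat : Nat) : Int) := by omega
  have hLlen : r.toNat ≤ rest.length := by omega
  have hins : PySem.List.insert rest r (v + d, k) =
      rest.take r.toNat ++ (v + d, k) :: rest.drop r.toNat := by
    rw [hrL]; exact PySem.List.insert_natCast rest r.toNat (v + d, k) hLlen
  -- rewrite the load update
  have hgk : PySem.List.pyGetD loads k 0 = v := by
    rw [hk, PySem.List.pyGetD_natCast, List.getD_eq_getElem loads 0 hik, hv]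
  have hset : PySem.List.pySetD loads k (PySem.List.pyGetD loads k 0 + d) =
      loads.set i (v + d) := by
    rw [hgk, PySem.List.pySetD_of_nonneg loads (v + d) (by omega), hk]
    simp
  constructor
  · -- Pairwise
    rw [hins, List.pairwise_append]
    refine ⟨List.Pairwise.sublist (List.take_sublist _ _) hpwr,
      ?_, ?_⟩
    · rw [List.pairwise_cons]
      refine ⟨?_, List.Pairwise.sublist (List.drop_sublist _ _) hpwr⟩
      intro y hy
      obtain ⟨j, hj, hyj⟩ := List.mem_iff_getElem.mp hy
      rw [List.getElem_drop] at hyj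
      have hfa := habove (r.toNat + j) (by simp at hj; omega) (by omega)
      rw [hyj] at hfa
      exact (gsLe_false_iff _ _).mp hfa
    · intro a ha b hb
      obtain ⟨p, hp, hap⟩ := List.mem_iff_getElem.mp ha
      have hplen : p < rest.length := by simp at hp; omega
      have hpr : p < r.toNat := by simp at hp; omega
      rw [List.getElem_take] at hap
      rcases List.mem_cons.mp hb with hb' | hb'
      · -- b is the new item
        subst hb'
        have hle := hbelow p hplen (by omega)
        rw [hap] at hle
        apply pltP_of_gsLe_of_ne hle
        intro hsnd
        apply hknr
        rw [← show a.2 = k from hsnd, ← hap]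
        exact List.mem_map_of_mem (List.getElem_mem hplen)
      · obtain ⟨j, hj, hbj⟩ := List.mem_iff_getElem.mp hb'
        rw [List.getElem_drop] at hbj
        have := List.pairwise_iff_getElem.mp hpwr p (r.toNat + j)
          hplen (by simp at hj; omega) (by omega)
        rw [hap, hbj] at this
        exact this
  · -- Perm
    rw [hins, hset]
    have h1 : (rest.take r.toNat ++ (v + d, k) :: rest.drop r.toNat).Perm
        ((v + d, k) :: rest) := by
      have := @List.perm_middle _ (v + d, k) (rest.take r.toNat) (rest.drop r.toNat)
      rwa [List.take_append_drop] at this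
    have hie : i < (enumP loads).length := by rw [length_enumP]; exact hik
    have hgi : (enumP loads)[i] = (v, k) := by
      rw [getElem_enumP loads i hik, ← hv, hk]
    have h2 : rest.Perm ((enumP loads).eraseIdx i) := by
      have hl : ((v, k) :: rest).Perm ((v, k) :: (enumP loads).eraseIdx i) := by
        refine h.2.trans ?_
        have := List.getElem_cons_eraseIdx_perm hie
        rw [hgi] at this
        exact this.symm
      exact (List.perm_cons _).mp hl
    have h3 : enumP (loads.set i (v + d)) = (enumP loads).set i (v + d, (i : Int)) :=
      enumP_set loads i (v + d) hik
    rw [h3]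
    refine (h1.trans ?_).trans (List.set_perm_cons_eraseIdx hie (v + d, (i : Int))).symm
    rw [← hk]
    exact h2.cons _

lemma loop_eq (M : Int) (ds : List Int) (hM : 1 ≤ M) :
    ∀ (jobs : List Int) (assign : List (List Int)) (loads : List Int) (pq : List (Int × Int)),
    loads.length = M.toNat → gsInv loads pq →
    (jobs.foldl (gsStepA M ds) (assign, loads)).1 = (jobs.foldl (gsStepB ds) (assign, pq)).1 := by
  intro jobs
  induction jobs with
  | nil => intro assign loads pq _ _; rfl
  | cons j js ih =>
    intro assign loads pq hlen hinv
    cases pq with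
    | nil =>
      exfalso
      have hl := hinv.2.length_eq
      rw [length_enumP] at hl
      simp at hl
      omega
    | cons hd rest =>
      obtain ⟨v, k⟩ := hd
      have hmm : gsMin M loads = k := gsMin_eq_head hlen hM hinv
      simp only [List.foldl_cons]
      have hstepA : gsStepA M ds (assign, loads) j =
          (PySem.List.pySetD assign k (PySem.List.pyGetD assign k [] ++ [j]),
           PySem.List.pySetD loads k
             (PySem.List.pyGetD loads k 0 + PySem.List.pyGetD ds j 0)) := by
        simp only [gsStepA, hmm]
      have hstepB : gsStepB ds (assign, (v, k) :: rest) j =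
          (PySem.List.pySetD assign k (PySem.List.pyGetD assign k [] ++ [j]),
           PySem.List.insert rest
             (gsBisect rest (v + PySem.List.pyGetD ds j 0, k) 0 (rest.length : Int))
             (v + PySem.List.pyGetD ds j 0, k)) := rfl
      rw [hstepA, hstepB]
      apply ih
      · rw [PySem.List.pySetD_of_nonneg]
        · simp [hlen]
        · obtain ⟨i, _, hk, _⟩ := inv_head hinv
          omega
      · exact inv_step hinv

-- ===== VERDICT (by name: the statement is the Claim_ definition above) =====
lemma init_pq_eq (M : Int) :
    (PySem.List.pyRange 0 M 1).map (fun m => ((0 : Int), m)) =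
    enumP (List.replicate M.toNat (0 : Int)) := by
  apply List.ext_getElem
  · simp [length_enumP, PySem.List.length_pyRange_one]
  · intro j h1 h2
    have hj : j < M.toNat := by
      simpa [PySem.List.length_pyRange_one] using h1
    rw [getElem_enumP _ j (by simpa using hj)]
    simp [PySem.List.getElem_pyRange_one]

lemma init_inv (M : Int) :
    gsInv (List.replicate M.toNat (0 : Int))
      ((PySem.List.pyRange 0 M 1).map (fun m => ((0 : Int), m))) := by
  constructor
  · rw [List.pairwise_map]
    apply List.Pairwise.imp ?_ (PySem.List.pairwise_lt_pyRange_one 0 M)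
    intro a b hab
    exact Or.inr ⟨rfl, hab⟩
  · rw [init_pq_eq]

theorem greedy_spt_spec : Claim_equal_greedy_spt := by
  intro M ds _ hpre
  unfold Spec_greedy_spt
  rcases hpre with hM | hnil
  · unfold greedy_spt greedy_spt_alt
    apply loop_eq M ds hM
    · rw [PySem.List.pyRepeat_singleton]
      simp
    · rw [PySem.List.pyRepeat_singleton]
      exact init_inv M
  · subst hnil
    rfl
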